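-- pv_equiv track=rewrite | github.com/lein5in/AI-guitar-tabs-generator | backend/app/core/tuning_detector.py | _score_tuning
-- ===== SOURCE A (Python) =====
-- def _score_tuning(tuning_midi, detected_midi, low_notes, note_counts):
--     """
--     Score how well a tuning matches the detected notes
--
--     Args:
--         tuning_midi: MIDI notes of the tuning (already transposed if capo)
--         detected_midi: All detected MIDI notes
--         low_notes: Lowest detected notes
--         note_counts: Frequency of each note
--
--     Returns:
--         float: Score (higher = better match)
--     """
--     score = 0
--
--     # 1. Les cordes à vide du tuning devraient être présentes et fréquentes
--     for tuning_note in tuning_midi: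
--         if tuning_note in detected_midi:
--             score += 20  # Note présente
--
--             # Bonus si c'est une note fréquente (probablement corde à vide)
--             frequency = note_counts.get(tuning_note, 0)
--             if frequency > 2:
--                 score += min(frequency * 5, 30)  # Max +30 pour notes très fréquentes
--
--     # 2. La note la plus grave détectée devrait matcher la corde grave du tuning
--     if low_notes:
--         lowest_detected = low_notes[0]
--         lowest_tuning = tuning_midi[0]
--
--         # Match parfait
--         if lowest_detected == lowest_tuning:
--             score += 40
--         # Proche (± 1 semitone)
--         elif abs(lowest_detected - lowest_tuning) == 1:
--             score += 20
--         # Octave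
--         elif abs(lowest_detected - lowest_tuning) == 12:
--             score += 15
--         # Trop différent
--         elif abs(lowest_detected - lowest_tuning) > 3:
--             score -= 20
--
--     # 3. Les notes détectées devraient être jouables dans ce tuning
--     # (sur le manche jusqu'à la 12ème frette)
--     playable_notes = set()
--     for string_midi in tuning_midi:
--         for fret in range(13):  # 0-12 frettes
--             playable_notes.add(string_midi + fret)
--
--     # Bonus pour notes jouables
--     for detected in detected_midi:
--         if detected in playable_notes:
--             score += 2
--         else:
--             score -= 5  # Pénalité pour notes non jouables
--
--     return score
-- ===== SOURCE B (Python) =====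
-- def _score_tuning(tuning_midi, detected_midi, low_notes, note_counts):
--     # Part 1: open-string presence + frequency bonus, as a sum over matching strings
--     score = sum(
--         20 + (min(note_counts.get(t, 0) * 5, 30) if note_counts.get(t, 0) > 2 else 0)
--         for t in tuning_midi
--         if t in detected_midi
--     )
--
--     # Part 2: lowest-note match bonus, keyed on the absolute distance
--     if low_notes:
--         d = abs(low_notes[0] - tuning_midi[0])
--         if d == 0:
--             score += 40
--         elif d == 1:
--             score += 20
--         elif d == 12:
--             score += 15
--         elif d > 3:
--             score -= 20
--
--     # Part 3: playability tested arithmetically per note (no precomputed fret table)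
--     score += sum(
--         2 if any(0 <= n - s <= 12 for s in tuning_midi) else -5
--         for n in detected_midi
--     )
--     return score
-- ===== Notes on version B (the rewrite author's own statement) =====
-- stated objective: simpler
-- what changed: Replaces the double-loop precomputed fret-table set and its membership test by a direct arithmetic playability scan (any(0 <= n - s <= 12)); parts 1 and 3 become sum-comprehensions instead of an accumulator loop.
import Mathlib
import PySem

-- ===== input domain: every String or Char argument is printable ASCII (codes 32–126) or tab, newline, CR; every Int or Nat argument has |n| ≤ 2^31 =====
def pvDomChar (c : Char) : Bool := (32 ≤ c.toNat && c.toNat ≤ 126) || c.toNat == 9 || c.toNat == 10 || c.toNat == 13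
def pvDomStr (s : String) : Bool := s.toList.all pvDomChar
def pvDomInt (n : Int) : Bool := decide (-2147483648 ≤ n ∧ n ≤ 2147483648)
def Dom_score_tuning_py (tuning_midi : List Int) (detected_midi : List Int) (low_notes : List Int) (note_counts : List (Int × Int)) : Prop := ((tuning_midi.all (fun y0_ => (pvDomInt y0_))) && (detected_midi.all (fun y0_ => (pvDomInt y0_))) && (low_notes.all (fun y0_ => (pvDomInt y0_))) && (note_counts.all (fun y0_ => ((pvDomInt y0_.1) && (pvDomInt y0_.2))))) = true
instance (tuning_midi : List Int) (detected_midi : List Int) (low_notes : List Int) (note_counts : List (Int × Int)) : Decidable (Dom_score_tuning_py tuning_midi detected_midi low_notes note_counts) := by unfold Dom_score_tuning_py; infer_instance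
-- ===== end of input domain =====

-- B replaces A's precomputed fret-table set by a per-note arithmetic playability scan and
-- turns accumulator loops into sums (objective: simpler; same return values).

-- ===== PORT A =====
def score_tuning_py (tuning_midi : List Int) (detected_midi : List Int) (low_notes : List Int) (note_counts : List (Int × Int)) : Int :=
  -- part 1: loop over tuning strings, accumulating score
  let score : Int := 0
  let score : Int := tuning_midi.foldl (fun sc tuning_note =>
    if tuning_note ∈ detected_midi then
      let sc := sc + 20
      let frequency := PySem.Dict.getD (PySem.Dict.mk note_counts) tuning_note 0
      if frequency > 2 then sc + min (frequency * 5) 30 else sc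
    else sc) score
  -- part 2: lowest note; tuning_midi[0] raises IndexError when tuning_midi = [] (excluded by Pre_)
  let score : Int :=
    match low_notes with
    | [] => score
    | lowest_detected :: _ =>
      let lowest_tuning := (PySem.List.pyGet? tuning_midi 0).getD 0  -- none = IndexError, outside Pre_
      if lowest_detected == lowest_tuning then score + 40
      else if (lowest_detected - lowest_tuning).natAbs = 1 then score + 20
      else if (lowest_detected - lowest_tuning).natAbs = 12 then score + 15
      else if (lowest_detected - lowest_tuning).natAbs > 3 then score - 20
      else score
  -- part 3 (A): build the playable-notes set, then score each detected note by membership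
  let playable_notes : PySem.Set Int := tuning_midi.foldl (fun s string_midi =>
    (PySem.List.pyRange 0 13 1).foldl (fun s fret => PySem.Set.add s (string_midi + fret)) s)
    PySem.Set.empty
  let score : Int := detected_midi.foldl (fun sc detected =>
    if PySem.Set.contains playable_notes detected then sc + 2 else sc - 5) score
  score

-- ===== PORT B =====
def score_tuning_py_alt (tuning_midi : List Int) (detected_midi : List Int) (low_notes : List Int) (note_counts : List (Int × Int)) : Int :=
  -- part 1 as a sum over the matching strings
  let score : Int :=
    ((tuning_midi.filter (fun t => t ∈ detected_midi)).map (fun t =>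
      20 + (if PySem.Dict.getD (PySem.Dict.mk note_counts) t 0 > 2
            then min (PySem.Dict.getD (PySem.Dict.mk note_counts) t 0 * 5) 30 else 0))).sum
  -- part 2 keyed on the absolute distance
  let score : Int :=
    match low_notes with
    | [] => score
    | l :: _ =>
      let d := (l - (PySem.List.pyGet? tuning_midi 0).getD 0).natAbs  -- tuning_midi[0]: IndexError outside Pre_
      if d = 0 then score + 40
      else if d = 1 then score + 20
      else if d = 12 then score + 15
      else if d > 3 then score - 20
      else score
  -- part 3 (B): arithmetic playability test per detected note
  score + (detected_midi.map (fun n =>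
    if tuning_midi.any (fun s => decide (0 ≤ n - s) && decide (n - s ≤ 12)) then (2 : Int) else -5)).sum

-- ===== PRECONDITION & SPEC =====
-- Pre_ excludes exactly the inputs where Python A raises IndexError at tuning_midi[0]:
-- low_notes nonempty with tuning_midi empty (B raises there too).
def Pre_score_tuning_py (tuning_midi : List Int) (_detected_midi : List Int) (low_notes : List Int) (_note_counts : List (Int × Int)) : Prop :=
  low_notes ≠ [] → tuning_midi ≠ []
instance (tuning_midi : List Int) (detected_midi : List Int) (low_notes : List Int) (note_counts : List (Int × Int)) : Decidable (Pre_score_tuning_py tuning_midi detected_midi low_notes note_counts) := by unfold Pre_score_tuning_py; infer_instance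
def pvWitness_score_tuning_py : List Int × List Int × List Int × (List (Int × Int)) := ([40, 45, 50], [40, 52, 45], [40], [(40, 3), (45, 1)])

def Spec_score_tuning_py (tuning_midi : List Int) (detected_midi : List Int) (low_notes : List Int) (note_counts : List (Int × Int)) (out : Int) : Prop := out = score_tuning_py_alt tuning_midi detected_midi low_notes note_counts
instance (tuning_midi : List Int) (detected_midi : List Int) (low_notes : List Int) (note_counts : List (Int × Int)) (out : Int) : Decidable (Spec_score_tuning_py tuning_midi detected_midi low_notes note_counts out) := by unfold Spec_score_tuning_py; infer_instance

-- ===== CLAIM (what is proved, stated in full; the proofs are below) =====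
def Claim_equal_score_tuning_py : Prop := ∀ (tuning_midi : List Int) (detected_midi : List Int) (low_notes : List Int) (note_counts : List (Int × Int)), Dom_score_tuning_py tuning_midi detected_midi low_notes note_counts → Pre_score_tuning_py tuning_midi detected_midi low_notes note_counts → Spec_score_tuning_py tuning_midi detected_midi low_notes note_counts (score_tuning_py tuning_midi detected_midi low_notes note_counts)

-- ===== LEMMAS AND PROOFS =====

-- part 1: A's accumulator fold equals the start value plus B's sum
theorem part1_eq (dm : List Int) (nc : List (Int × Int)) :
    ∀ (tm : List Int) (sc : Int),
      tm.foldl (fun sc t =>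
        if t ∈ dm then
          let sc := sc + 20
          let f := PySem.Dict.getD (PySem.Dict.mk nc) t 0
          if f > 2 then sc + min (f * 5) 30 else sc
        else sc) sc
      = sc + ((tm.filter (fun t => t ∈ dm)).map (fun t =>
          20 + (if PySem.Dict.getD (PySem.Dict.mk nc) t 0 > 2
                then min (PySem.Dict.getD (PySem.Dict.mk nc) t 0 * 5) 30 else 0))).sum := by
  intro tm
  induction tm with
  | nil => intro sc; simp
  | cons t tm ih =>
    intro sc
    by_cases h : t ∈ dm
    · simp only [List.foldl_cons, List.filter_cons, h, if_pos, decide_true, List.map_cons,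
        List.sum_cons]
      rw [ih]
      by_cases hf : PySem.Dict.getD (PySem.Dict.mk nc) t 0 > 2 <;> simp [hf] <;> ring
    · simp only [List.foldl_cons, List.filter_cons, decide_eq_true_eq, h]
      rw [ih]
      simp

-- generic: membership in a fold of Set.add
theorem mem_foldl_add_int (g : Int → Int) (x : Int) :
    ∀ (l : List Int) (s : PySem.Set Int),
      x ∈ l.foldl (fun s f => PySem.Set.add s (g f)) s ↔ x ∈ s ∨ ∃ f ∈ l, x = g f := by
  intro l
  induction l with
  | nil => intro s; simp
  | cons f l ih =>
    intro s
    rw [List.foldl_cons, ih, PySem.Set.mem_add]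
    constructor
    · rintro ((h | h) | ⟨f', hf', h⟩)
      · exact Or.inl h
      · exact Or.inr ⟨f, List.mem_cons_self, h⟩
      · exact Or.inr ⟨f', List.mem_cons_of_mem _ hf', h⟩
    · rintro (h | ⟨f', hf', h⟩)
      · exact Or.inl (Or.inl h)
      · rcases List.mem_cons.mp hf' with rfl | hf'
        · exact Or.inl (Or.inr h)
        · exact Or.inr ⟨f', hf', h⟩

-- membership in A's fret table ↔ B's arithmetic condition
theorem playable_mem (tm : List Int) (d : Int) :
    ∀ (s0 : PySem.Set Int),
      (d ∈ tm.foldl (fun s sm =>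
          (PySem.List.pyRange 0 13 1).foldl (fun s fret => PySem.Set.add s (sm + fret)) s) s0)
      ↔ (d ∈ s0 ∨ ∃ s ∈ tm, 0 ≤ d - s ∧ d - s ≤ 12) := by
  induction tm with
  | nil => intro s0; simp
  | cons sm tm ih =>
    intro s0
    rw [List.foldl_cons, ih, mem_foldl_add_int]
    have hrange : PySem.List.pyRange 0 13 1 = [0,1,2,3,4,5,6,7,8,9,10,11,12] := by decide
    have hinner : (∃ f ∈ PySem.List.pyRange 0 13 1, d = sm + f) ↔ (0 ≤ d - sm ∧ d - sm ≤ 12) := by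
      rw [hrange]
      constructor
      · rintro ⟨f, hf, rfl⟩
        simp only [List.mem_cons, List.not_mem_nil, or_false] at hf
        omega
      · intro h
        refine ⟨d - sm, ?_, by ring⟩
        simp only [List.mem_cons, List.not_mem_nil, or_false]
        omega
    rw [hinner]
    constructor
    · rintro ((h | h) | ⟨s, hs, h⟩)
      · exact Or.inl h
      · exact Or.inr ⟨sm, List.mem_cons_self, h⟩
      · exact Or.inr ⟨s, List.mem_cons_of_mem _ hs, h⟩
    · rintro (h | ⟨s, hs, h⟩)
      · exact Or.inl (Or.inl h)
      · rcases List.mem_cons.mp hs with rfl | hs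
        · exact Or.inl (Or.inr h)
        · exact Or.inr ⟨s, hs, h⟩

-- part 3: A's membership fold equals the start value plus B's sum
theorem part3_eq (tm : List Int) :
    ∀ (dm : List Int) (sc : Int),
      dm.foldl (fun sc d =>
        if PySem.Set.contains
            (tm.foldl (fun s sm =>
              (PySem.List.pyRange 0 13 1).foldl (fun s fret => PySem.Set.add s (sm + fret)) s)
              PySem.Set.empty) d
        then sc + 2 else sc - 5) sc
      = sc + (dm.map (fun n =>
          if tm.any (fun s => decide (0 ≤ n - s) && decide (n - s ≤ 12)) then (2 : Int) else -5)).sum := by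
  intro dm
  induction dm with
  | nil => intro sc; simp
  | cons d dm ih =>
    intro sc
    have hmem : PySem.Set.contains
        (tm.foldl (fun s sm =>
          (PySem.List.pyRange 0 13 1).foldl (fun s fret => PySem.Set.add s (sm + fret)) s)
          PySem.Set.empty) d
        = tm.any (fun s => decide (0 ≤ d - s) && decide (d - s ≤ 12)) := by
      rcases h : tm.any (fun s => decide (0 ≤ d - s) && decide (d - s ≤ 12)) with _ | _
      · simp only [List.any_eq_false, Bool.and_eq_true, decide_eq_true_eq, not_and] at h
        have hnot : ¬ (d ∈ (PySem.Set.empty : PySem.Set Int) ∨ ∃ s ∈ tm, 0 ≤ d - s ∧ d - s ≤ 12) := by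
          rintro (hc | ⟨s, hs, h1, h2⟩)
          · simp [PySem.Set.empty] at hc
          · exact h s hs h1 h2
        rw [← playable_mem] at hnot
        simpa using hnot
      · simp only [List.any_eq_true, Bool.and_eq_true, decide_eq_true_eq] at h
        obtain ⟨s, hs, h1, h2⟩ := h
        have hin : d ∈ (PySem.Set.empty : PySem.Set Int) ∨ ∃ s ∈ tm, 0 ≤ d - s ∧ d - s ≤ 12 :=
          Or.inr ⟨s, hs, h1, h2⟩
        rw [← playable_mem] at hin
        simpa using hin
    simp only [List.foldl_cons, List.map_cons, List.sum_cons, hmem]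
    rw [ih]
    by_cases h : tm.any (fun s => decide (0 ≤ d - s) && decide (d - s ≤ 12)) = true
    · simp only [h, if_pos]; ring
    · simp only [h, if_neg, Bool.false_eq_true, not_false_iff]
      ring

-- ===== VERDICT (by name: the statement is the Claim_ definition above) =====
theorem score_tuning_py_spec : Claim_equal_score_tuning_py := by
  intro tm dm ln nc _ _
  unfold Spec_score_tuning_py score_tuning_py score_tuning_py_alt
  dsimp only
  rw [part1_eq, part3_eq]
  cases ln with
  | nil => simp
  | cons l _ =>
    simp only [zero_add]
    by_cases h0 : (l - (PySem.List.pyGet? tm 0).getD 0) = 0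
    · have hbeq : (l == (PySem.List.pyGet? tm 0).getD 0) = true := by
        simp only [beq_iff_eq]; omega
      simp [hbeq, h0]
    · have hbeq : (l == (PySem.List.pyGet? tm 0).getD 0) = false := by
        simp only [beq_eq_false_iff_ne, ne_eq]; omega
      have hne : ¬ (l - (PySem.List.pyGet? tm 0).getD 0).natAbs = 0 := by
        simp only [Int.natAbs_eq_zero]; omega
      simp only [hbeq, Bool.false_eq_true, hne, if_neg, not_false_iff]
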